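-- pv_equiv track=rewrite | github.com/yifanfengsu/CTA | scripts/postmortem_trend_entry_timing.py | primary_failure_category
-- ===== SOURCE A (Python) =====
-- def primary_failure_category(reasons: list[str]) -> str:
--     """Classify the primary gate failure."""
--
--     if not reasons:
--         return "none"
--     if any("no_cost_pnl_not_positive" in reason for reason in reasons):
--         return "no_cost_split_failure"
--     if any("cost_aware_pnl_negative" in reason for reason in reasons):
--         return "cost_or_execution_failure"
--     if any("funding_adjusted_pnl_negative" in reason for reason in reasons):
--         return "funding_adjusted_failure"
--     if any("trend_segment_recall" in reason or "early_entry_rate" in reason or "direction_match" in reason for reason in reasons):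
--         return "trend_capture_quality_failure"
--     if any("symbol" in reason or "top_5pct" in reason for reason in reasons):
--         return "concentration_failure"
--     if any("reverse" in reason or "random" in reason for reason in reasons):
--         return "control_failure"
--     if any("trade_count" in reason for reason in reasons):
--         return "sample_size_failure"
--     return "other_gate_failure"
-- ===== SOURCE B (Python) =====
-- _TABLE = [
--     ("no_cost_split_failure", ["no_cost_pnl_not_positive"]),
--     ("cost_or_execution_failure", ["cost_aware_pnl_negative"]),
--     ("funding_adjusted_failure", ["funding_adjusted_pnl_negative"]),
--     ("trend_capture_quality_failure", ["trend_segment_recall", "early_entry_rate", "direction_match"]),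
--     ("concentration_failure", ["symbol", "top_5pct"]),
--     ("control_failure", ["reverse", "random"]),
--     ("sample_size_failure", ["trade_count"]),
-- ]
--
--
-- def _first_idx(reason):
--     for i, (_, subs) in enumerate(_TABLE):
--         if any(sub in reason for sub in subs):
--             return i
--     return len(_TABLE)
--
--
-- def primary_failure_category(reasons: list[str]) -> str:
--     if not reasons:
--         return "none"
--     best = len(_TABLE)
--     for reason in reasons:
--         best = min(best, _first_idx(reason))
--     return _TABLE[best][0] if best < len(_TABLE) else "other_gate_failure"
-- ===== Notes on version B (the rewrite author's own statement) =====
-- stated objective: alternative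
-- what changed: Replaced A's category-outer if-chain of any() scans with an ordered priority table of (category, substrings) and a single pass over the reasons tracking the minimum matching table index.
import Mathlib
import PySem

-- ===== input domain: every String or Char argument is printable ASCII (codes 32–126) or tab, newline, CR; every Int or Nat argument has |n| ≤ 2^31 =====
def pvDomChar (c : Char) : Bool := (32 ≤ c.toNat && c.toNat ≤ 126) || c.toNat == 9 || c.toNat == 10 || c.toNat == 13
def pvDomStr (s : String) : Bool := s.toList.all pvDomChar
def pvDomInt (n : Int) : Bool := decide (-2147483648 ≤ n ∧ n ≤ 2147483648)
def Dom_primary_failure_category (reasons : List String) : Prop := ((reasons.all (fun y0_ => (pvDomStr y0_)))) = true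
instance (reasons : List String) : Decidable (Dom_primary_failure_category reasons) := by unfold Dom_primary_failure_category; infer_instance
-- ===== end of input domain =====

-- B replaces A's category-outer if-chain by an ordered priority table and one pass over the
-- reasons tracking the minimum matching table index (objective: alternative decomposition).


-- ===== PORT A =====
def primary_failure_category (reasons : List String) : String :=
  if reasons.isEmpty then "none"
  else if reasons.any (fun reason => PySem.Str.isIn "no_cost_pnl_not_positive" reason) then "no_cost_split_failure"
  else if reasons.any (fun reason => PySem.Str.isIn "cost_aware_pnl_negative" reason) then "cost_or_execution_failure"
  else if reasons.any (fun reason => PySem.Str.isIn "funding_adjusted_pnl_negative" reason) then "funding_adjusted_failure"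
  else if reasons.any (fun reason => PySem.Str.isIn "trend_segment_recall" reason || PySem.Str.isIn "early_entry_rate" reason || PySem.Str.isIn "direction_match" reason) then "trend_capture_quality_failure"
  else if reasons.any (fun reason => PySem.Str.isIn "symbol" reason || PySem.Str.isIn "top_5pct" reason) then "concentration_failure"
  else if reasons.any (fun reason => PySem.Str.isIn "reverse" reason || PySem.Str.isIn "random" reason) then "control_failure"
  else if reasons.any (fun reason => PySem.Str.isIn "trade_count" reason) then "sample_size_failure"
  else "other_gate_failure"

-- ===== PORT B =====
def pvTable : List (String × List String) :=
  [("no_cost_split_failure", ["no_cost_pnl_not_positive"]),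
   ("cost_or_execution_failure", ["cost_aware_pnl_negative"]),
   ("funding_adjusted_failure", ["funding_adjusted_pnl_negative"]),
   ("trend_capture_quality_failure", ["trend_segment_recall", "early_entry_rate", "direction_match"]),
   ("concentration_failure", ["symbol", "top_5pct"]),
   ("control_failure", ["reverse", "random"]),
   ("sample_size_failure", ["trade_count"])]

-- index (within the remaining table) of the first entry any of whose substrings occurs in the reason
def pvFirstIdx (reason : String) : List (String × List String) → Nat
  | [] => 0
  | (_, subs) :: rest =>
      if subs.any (fun sub => PySem.Str.isIn sub reason) then 0 else pvFirstIdx reason rest + 1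

def primary_failure_category_alt (reasons : List String) : String :=
  if reasons.isEmpty then "none"
  else
    let best := reasons.foldl (fun b reason => min b (pvFirstIdx reason pvTable)) pvTable.length
    match pvTable[best]? with
    | some entry => entry.1
    | none => "other_gate_failure"

-- ===== PRECONDITION & SPEC =====
def Spec_primary_failure_category (reasons : List String) (out : String) : Prop := out = primary_failure_category_alt reasons
instance (reasons : List String) (out : String) : Decidable (Spec_primary_failure_category reasons out) := by unfold Spec_primary_failure_category; infer_instance

-- ===== CLAIM (what is proved, stated in full; the proofs are below) =====
def Claim_equal_primary_failure_category : Prop := ∀ (reasons : List String), Dom_primary_failure_category reasons → Spec_primary_failure_category reasons (primary_failure_category reasons)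

-- ===== LEMMAS AND PROOFS =====

-- the seven per-reason match conditions, in A's branch order
def pvM0 (r : String) : Bool := PySem.Str.isIn "no_cost_pnl_not_positive" r
def pvM1 (r : String) : Bool := PySem.Str.isIn "cost_aware_pnl_negative" r
def pvM2 (r : String) : Bool := PySem.Str.isIn "funding_adjusted_pnl_negative" r
def pvM3 (r : String) : Bool := PySem.Str.isIn "trend_segment_recall" r || PySem.Str.isIn "early_entry_rate" r || PySem.Str.isIn "direction_match" r
def pvM4 (r : String) : Bool := PySem.Str.isIn "symbol" r || PySem.Str.isIn "top_5pct" r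
def pvM5 (r : String) : Bool := PySem.Str.isIn "reverse" r || PySem.Str.isIn "random" r
def pvM6 (r : String) : Bool := PySem.Str.isIn "trade_count" r

-- index of the first true among seven flags (7 if none)
def pvChain (a0 a1 a2 a3 a4 a5 a6 : Bool) : Nat :=
  if a0 then 0 else if a1 then 1 else if a2 then 2 else if a3 then 3
  else if a4 then 4 else if a5 then 5 else if a6 then 6 else 7

lemma pvFirstIdx_eq (r : String) :
    pvFirstIdx r pvTable = pvChain (pvM0 r) (pvM1 r) (pvM2 r) (pvM3 r) (pvM4 r) (pvM5 r) (pvM6 r) := by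
  simp only [pvFirstIdx, pvTable, pvChain, pvM0, pvM1, pvM2, pvM3, pvM4, pvM5, pvM6,
    List.any_cons, List.any_nil, Bool.or_false, Bool.or_assoc]
  split_ifs <;> omega

lemma pvChain_min : ∀ a0 a1 a2 a3 a4 a5 a6 b0 b1 b2 b3 b4 b5 b6 : Bool,
    min (pvChain a0 a1 a2 a3 a4 a5 a6) (pvChain b0 b1 b2 b3 b4 b5 b6)
      = pvChain (a0 || b0) (a1 || b1) (a2 || b2) (a3 || b3) (a4 || b4) (a5 || b5) (a6 || b6) := by
  decide

lemma pvFold_eq : ∀ (rs : List String) (b : Nat), b ≤ 7 →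
    rs.foldl (fun b reason => min b (pvFirstIdx reason pvTable)) b
      = min b (pvChain (rs.any pvM0) (rs.any pvM1) (rs.any pvM2) (rs.any pvM3)
                       (rs.any pvM4) (rs.any pvM5) (rs.any pvM6))
  | [], b, hb => by
      simp [pvChain, Nat.min_eq_left hb]
  | r :: rest, b, hb => by
      simp only [List.foldl_cons, List.any_cons]
      rw [pvFold_eq rest (min b (pvFirstIdx r pvTable)) (by
        have := Nat.min_le_left b (pvFirstIdx r pvTable); omega),
        pvFirstIdx_eq, Nat.min_assoc, pvChain_min]

lemma pvName_eq : ∀ a0 a1 a2 a3 a4 a5 a6 : Bool,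
    (match pvTable[pvChain a0 a1 a2 a3 a4 a5 a6]? with
     | some entry => entry.1
     | none => "other_gate_failure")
      = if a0 then "no_cost_split_failure" else if a1 then "cost_or_execution_failure"
        else if a2 then "funding_adjusted_failure" else if a3 then "trend_capture_quality_failure"
        else if a4 then "concentration_failure" else if a5 then "control_failure"
        else if a6 then "sample_size_failure" else "other_gate_failure" := by
  decide

-- ===== VERDICT (by name: the statement is the Claim_ definition above) =====
theorem primary_failure_category_spec : Claim_equal_primary_failure_category := by
  intro reasons _
  unfold Spec_primary_failure_category primary_failure_category primary_failure_category_alt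
  by_cases h : reasons.isEmpty
  · simp [h]
  · simp only [h]
    rw [show pvTable.length = 7 from rfl, pvFold_eq reasons 7 (by omega),
      Nat.min_eq_right (by unfold pvChain; split_ifs <;> omega), pvName_eq]
    rfl
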